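-- pv_equiv track=rewrite | github.com/c-tel/Information-Retrieval | coord_index/coord_client.py | coord_intersect
-- ===== SOURCE A (Python) =====
-- def coord_intersect(pos1: list, pos2: list, dist):
--     res = []
--     i = j = 0
--     while i < len(pos1) and j < len(pos2):
--         cmp = pos2[j] - pos1[i]
--         if cmp < 0:
--             j += 1
--         else:
--             if cmp <= dist+1:
--                 res.append(pos2[j])
--             i += 1
--     return res
-- ===== SOURCE B (Python) =====
-- def coord_intersect(pos1: list, pos2: list, dist):
--     # Divide and conquer over pos1: intersect the left half against pos2,
--     # thread the first unconsumed pos2 index into the right half, concatenate.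
--     def go(lo, hi, j):
--         # returns (matches for pos1[lo:hi], first unconsumed index into pos2)
--         if hi - lo == 0:
--             return [], j
--         if hi - lo == 1:
--             x = pos1[lo]
--             while j < len(pos2) and pos2[j] < x:
--                 j += 1
--             if j < len(pos2) and pos2[j] - x <= dist + 1:
--                 return [pos2[j]], j
--             return [], j
--         mid = (lo + hi) // 2
--         left, j1 = go(lo, mid, j)
--         right, j2 = go(mid, hi, j1)
--         return left + right, j2
--
--     res, _ = go(0, len(pos1), 0)
--     return res
-- ===== Notes on version B (the rewrite author's own statement) =====
-- stated objective: alternative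
-- what changed: Replaces A's single iterative two-pointer while loop by a recursive divide-and-conquer over pos1 that splits it in half, intersects the left half, threads the first unconsumed pos2 index into the right half, and concatenates the halves' matches.
import Mathlib
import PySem

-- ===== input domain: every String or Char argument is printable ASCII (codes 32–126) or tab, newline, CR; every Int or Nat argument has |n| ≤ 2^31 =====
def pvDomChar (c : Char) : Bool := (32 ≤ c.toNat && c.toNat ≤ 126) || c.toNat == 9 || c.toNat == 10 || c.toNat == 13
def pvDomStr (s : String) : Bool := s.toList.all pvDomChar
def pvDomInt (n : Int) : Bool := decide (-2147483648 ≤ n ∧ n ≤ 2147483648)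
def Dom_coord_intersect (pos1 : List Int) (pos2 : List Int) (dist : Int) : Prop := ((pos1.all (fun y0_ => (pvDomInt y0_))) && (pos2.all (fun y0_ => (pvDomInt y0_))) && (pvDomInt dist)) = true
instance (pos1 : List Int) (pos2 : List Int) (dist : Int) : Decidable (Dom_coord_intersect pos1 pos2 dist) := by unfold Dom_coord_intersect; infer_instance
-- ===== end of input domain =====

-- B replaces A's iterative two-pointer merge by a recursive divide-and-conquer over pos1
-- that threads the unconsumed suffix of pos2 through the halves (alternative decomposition).

-- ===== PORT A =====
-- the while loop of A, over state (i, j, res); the guard ensures both indexings are in range, so getD is exact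
def coordILoop (pos1 : List Int) (pos2 : List Int) (dist : Int) (i j : Nat) (res : List Int) : List Int :=
  if i < pos1.length ∧ j < pos2.length then
    let cmp := pos2.getD j 0 - pos1.getD i 0
    if cmp < 0 then
      coordILoop pos1 pos2 dist i (j+1) res
    else
      if cmp ≤ dist + 1 then
        coordILoop pos1 pos2 dist (i+1) j (res ++ [pos2.getD j 0])
      else
        coordILoop pos1 pos2 dist (i+1) j res
  else res
termination_by (pos1.length - i) + (pos2.length - j)
decreasing_by all_goals omega

def coord_intersect (pos1 : List Int) (pos2 : List Int) (dist : Int) : List Int :=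
  coordILoop pos1 pos2 dist 0 0 []

-- ===== PORT B =====
-- the leaf's `while k < len(rest) and rest[k] < x: k += 1`; the guard keeps k in range, so getD is exact
def leafSkip (rest : List Int) (x : Int) (k : Nat) : Nat :=
  if k < rest.length ∧ rest.getD k 0 < x then leafSkip rest x (k+1) else k
termination_by rest.length - k
decreasing_by omega

-- Source B's `go(lo, hi, j)`; lo, hi, j are nonnegative Python ints (indices), so Nat; getD is exact (guards keep indices in range)
def coordDC (pos1 : List Int) (pos2 : List Int) (dist : Int) (lo hi j : Nat) : List Int × Nat :=
  if hi - lo = 0 then ([], j)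
  else if hi - lo = 1 then
    let x := pos1.getD lo 0
    let j' := leafSkip pos2 x j
    if j' < pos2.length ∧ pos2.getD j' 0 - x ≤ dist + 1 then ([pos2.getD j' 0], j')
    else ([], j')
  else
    let mid := (lo + hi) / 2
    let l := coordDC pos1 pos2 dist lo mid j
    let r := coordDC pos1 pos2 dist mid hi l.2
    (l.1 ++ r.1, r.2)
termination_by hi - lo
decreasing_by all_goals omega

def coord_intersect_alt (pos1 : List Int) (pos2 : List Int) (dist : Int) : List Int :=
  (coordDC pos1 pos2 dist 0 pos1.length 0).1

-- ===== PRECONDITION & SPEC =====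
def Spec_coord_intersect (pos1 : List Int) (pos2 : List Int) (dist : Int) (out : List Int) : Prop := out = coord_intersect_alt pos1 pos2 dist
instance (pos1 : List Int) (pos2 : List Int) (dist : Int) (out : List Int) : Decidable (Spec_coord_intersect pos1 pos2 dist out) := by unfold Spec_coord_intersect; infer_instance

-- ===== CLAIM (what is proved, stated in full; the proofs are below) =====
def Claim_equal_coord_intersect : Prop := ∀ (pos1 : List Int) (pos2 : List Int) (dist : Int), Dom_coord_intersect pos1 pos2 dist → Spec_coord_intersect pos1 pos2 dist (coord_intersect pos1 pos2 dist)

-- ===== LEMMAS AND PROOFS =====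

-- recursive reading of A's merge (proof helper; drop-free form of coordILoop)
def coordGo (pos1 : List Int) (pos2 : List Int) (dist : Int) : List Int :=
  match pos1, pos2 with
  | [], _ => []
  | _ :: _, [] => []
  | x :: xs, c :: cs =>
    if c < x then
      coordGo (x :: xs) cs dist
    else
      (if c - x ≤ dist + 1 then [c] else []) ++ coordGo xs (c :: cs) dist
termination_by pos1.length + pos2.length

lemma coordILoop_eq_go (pos1 pos2 : List Int) (dist : Int) :
    ∀ i j res, coordILoop pos1 pos2 dist i j res = res ++ coordGo (pos1.drop i) (pos2.drop j) dist := by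
  intro i j res
  fun_induction coordILoop pos1 pos2 dist i j res with
  | case1 i j res h cmp hlt ih =>
    have hlt2 : pos2.getD j 0 - pos1.getD i 0 < 0 := hlt
    rw [ih]
    rw [List.drop_eq_getElem_cons h.1, List.drop_eq_getElem_cons h.2]
    rw [coordGo]
    simp only [List.getD_eq_getElem _ _ h.1, List.getD_eq_getElem _ _ h.2] at hlt2
    rw [if_pos (by omega)]
  | case2 i j res h cmp hlt hle ih =>
    have hlt2 : ¬ pos2.getD j 0 - pos1.getD i 0 < 0 := hlt
    have hle2 : pos2.getD j 0 - pos1.getD i 0 ≤ dist + 1 := hle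
    rw [ih]
    rw [List.drop_eq_getElem_cons h.1, List.drop_eq_getElem_cons h.2]
    rw [coordGo]
    simp only [List.getD_eq_getElem _ _ h.1, List.getD_eq_getElem _ _ h.2] at hlt2 hle2
    rw [if_neg (by omega), if_pos (by omega)]
    simp [List.getElem?_eq_getElem h.2]
  | case3 i j res h cmp hlt hle ih =>
    have hlt2 : ¬ pos2.getD j 0 - pos1.getD i 0 < 0 := hlt
    have hle2 : ¬ pos2.getD j 0 - pos1.getD i 0 ≤ dist + 1 := hle
    rw [ih]
    rw [List.drop_eq_getElem_cons h.1, List.drop_eq_getElem_cons h.2]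
    rw [coordGo]
    simp only [List.getD_eq_getElem _ _ h.1, List.getD_eq_getElem _ _ h.2] at hlt2 hle2
    rw [if_neg (by omega), if_neg (by omega)]
    simp
  | case4 i j res h =>
    rcases Nat.lt_or_ge i pos1.length with h1 | h1
    · have h2 : pos2.length ≤ j := by omega
      rw [List.drop_eq_nil_of_le h2, List.drop_eq_getElem_cons h1]
      rw [coordGo]
      simp
    · rw [List.drop_eq_nil_of_le h1]
      simp [coordGo]

-- sequential reading of B: process the elements of xs left to right, threading the rest of pos2
def goSeq (dist : Int) (xs : List Int) (rest : List Int) : List Int × List Int :=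
  match xs with
  | [] => ([], rest)
  | x :: xs' =>
    let rest' := rest.drop (leafSkip rest x 0)
    let e := if rest' ≠ [] ∧ rest'.getD 0 0 - x ≤ dist + 1 then [rest'.getD 0 0] else []
    let p := goSeq dist xs' rest'
    (e ++ p.1, p.2)

lemma leafSkip_shift (c : Int) (cs : List Int) (x : Int) :
    ∀ k, leafSkip (c :: cs) x (k+1) = leafSkip cs x k + 1 := by
  intro k
  fun_induction leafSkip cs x k with
  | case1 k h ih =>
    rw [leafSkip, if_pos (by simpa using h)]
    exact ih
  | case2 k h =>
    rw [leafSkip, if_neg (by simpa using h)]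

lemma leafSkip_drop (pos2 : List Int) (x : Int) :
    ∀ j, leafSkip pos2 x j = j + leafSkip (pos2.drop j) x 0 := by
  intro j
  fun_induction leafSkip pos2 x j with
  | case1 j h ih =>
    have h2 : pos2.getD j 0 < x := h.2
    rw [ih]
    rw [List.drop_eq_getElem_cons h.1]
    have hx : pos2[j] < x := by rwa [List.getD_eq_getElem _ _ h.1] at h2
    have hcond : 0 < (pos2[j] :: pos2.drop (j+1)).length ∧
        (pos2[j] :: pos2.drop (j+1)).getD 0 0 < x :=
      ⟨by rw [List.length_cons]; omega, by rw [List.getD_cons_zero]; exact hx⟩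
    conv_rhs => rw [leafSkip]
    rw [if_pos hcond]
    rw [leafSkip_shift pos2[j] (pos2.drop (j+1)) x 0]
    omega
  | case2 j h =>
    rcases Nat.lt_or_ge j pos2.length with hj | hj
    · rw [List.drop_eq_getElem_cons hj]
      have hge : ¬ pos2[j] < x := by
        intro hc
        exact h ⟨hj, by rwa [List.getD_eq_getElem _ _ hj]⟩
      have hcond : ¬ (0 < (pos2[j] :: pos2.drop (j+1)).length ∧
          (pos2[j] :: pos2.drop (j+1)).getD 0 0 < x) := by
        simp only [List.getD_cons_zero]
        intro hc
        exact hge hc.2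
      rw [leafSkip, if_neg hcond]
      omega
    · rw [List.drop_eq_nil_of_le hj]
      rw [leafSkip, if_neg (by simp)]
      omega

lemma leafSkip_le (rest : List Int) (x : Int) :
    ∀ k, k ≤ rest.length → leafSkip rest x k ≤ rest.length := by
  intro k
  fun_induction leafSkip rest x k with
  | case1 k h ih => exact fun _ => ih (by omega)
  | case2 k h => exact fun hk => hk

lemma leafSkip_drop_cons_lt (c : Int) (cs : List Int) (x : Int) (hcx : c < x) :
    (c :: cs).drop (leafSkip (c :: cs) x 0) = cs.drop (leafSkip cs x 0) := by
  rw [leafSkip, if_pos (by simp; omega), leafSkip_shift]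
  simp

lemma leafSkip_drop_cons_ge (c : Int) (cs : List Int) (x : Int) (hcx : ¬ c < x) :
    (c :: cs).drop (leafSkip (c :: cs) x 0) = c :: cs := by
  rw [leafSkip, if_neg (by simp; omega)]
  simp

lemma goSeq_nil_rest (dist : Int) : ∀ xs, goSeq dist xs [] = ([], []) := by
  intro xs
  induction xs with
  | nil => rfl
  | cons x xs' ih =>
    rw [goSeq]
    simp [leafSkip, ih]

lemma goSeq_cons_lt (dist : Int) (x : Int) (xs : List Int) (c : Int) (cs : List Int)
    (hcx : c < x) : goSeq dist (x :: xs) (c :: cs) = goSeq dist (x :: xs) cs := by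
  rw [goSeq]
  conv_rhs => rw [goSeq]
  rw [leafSkip_drop_cons_lt c cs x hcx]

lemma goSeq_append (dist : Int) :
    ∀ (a b rest : List Int),
      goSeq dist (a ++ b) rest
        = ((goSeq dist a rest).1 ++ (goSeq dist b (goSeq dist a rest).2).1,
           (goSeq dist b (goSeq dist a rest).2).2) := by
  intro a
  induction a with
  | nil => intro b rest; simp [goSeq]
  | cons x a' ih =>
    intro b rest
    rw [List.cons_append, goSeq]
    conv_rhs => rw [goSeq]
    rw [ih]
    simp

lemma coordGo_eq_goSeq (dist : Int) :
    ∀ n xs rest, xs.length + rest.length ≤ n →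
      coordGo xs rest dist = (goSeq dist xs rest).1 := by
  intro n
  induction n with
  | zero =>
    intro xs rest hlen
    have h1 : xs = [] := by
      cases xs with
      | nil => rfl
      | cons a t => simp at hlen
    subst h1; simp [coordGo, goSeq]
  | succ n ih =>
    intro xs rest hlen
    match xs, rest with
    | [], _ => simp [coordGo, goSeq]
    | x :: xs', [] =>
      rw [coordGo, goSeq_nil_rest]
    | x :: xs', c :: cs =>
      rw [coordGo]
      by_cases hcx : c < x
      · rw [if_pos hcx, goSeq_cons_lt dist x xs' c cs hcx]
        exact ih (x :: xs') cs (by simp at hlen ⊢; omega)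
      · rw [if_neg hcx, goSeq]
        rw [leafSkip_drop_cons_ge c cs x hcx]
        simp only [List.getD_cons_zero, ne_eq, reduceCtorEq, not_false_eq_true, true_and]
        congr 1
        exact ih xs' (c :: cs) (by simp at hlen ⊢; omega)

lemma coordDC_inv (pos1 pos2 : List Int) (dist : Int) :
    ∀ m lo hi, hi - lo ≤ m → hi ≤ pos1.length → ∀ j, j ≤ pos2.length →
      (coordDC pos1 pos2 dist lo hi j).1
          = (goSeq dist ((pos1.drop lo).take (hi - lo)) (pos2.drop j)).1
        ∧ pos2.drop (coordDC pos1 pos2 dist lo hi j).2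
          = (goSeq dist ((pos1.drop lo).take (hi - lo)) (pos2.drop j)).2
        ∧ (coordDC pos1 pos2 dist lo hi j).2 ≤ pos2.length := by
  intro m
  induction m with
  | zero =>
    intro lo hi hm hhi j hj
    have h0 : hi - lo = 0 := by omega
    rw [coordDC, if_pos h0, h0]
    simp [goSeq, hj]
  | succ m ih =>
    intro lo hi hm hhi j hj
    by_cases h0 : hi - lo = 0
    · rw [coordDC, if_pos h0, h0]
      simp [goSeq, hj]
    · by_cases h1 : hi - lo = 1
      · rw [coordDC, if_neg h0, if_pos h1, h1]
        have hlo : lo < pos1.length := by omega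
        rw [List.drop_eq_getElem_cons hlo, List.take_succ_cons, List.take_zero]
        simp only [goSeq]
        rw [← List.getD_eq_getElem pos1 0 hlo]
        have hj' := leafSkip_drop pos2 (pos1.getD lo 0) j
        have hle : leafSkip pos2 (pos1.getD lo 0) j ≤ pos2.length :=
          leafSkip_le pos2 (pos1.getD lo 0) j hj
        have hrest : (pos2.drop j).drop (leafSkip (pos2.drop j) (pos1.getD lo 0) 0)
            = pos2.drop (leafSkip pos2 (pos1.getD lo 0) j) := by
          rw [List.drop_drop]
          congr 1
          omega
        rw [hrest]
        have hne : (pos2.drop (leafSkip pos2 (pos1.getD lo 0) j) ≠ [])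
            ↔ leafSkip pos2 (pos1.getD lo 0) j < pos2.length := by
          rw [ne_eq, List.drop_eq_nil_iff]
          omega
        by_cases hc : leafSkip pos2 (pos1.getD lo 0) j < pos2.length
        · have hval : (pos2.drop (leafSkip pos2 (pos1.getD lo 0) j)).getD 0 0
              = pos2.getD (leafSkip pos2 (pos1.getD lo 0) j) 0 := by
            rw [List.drop_eq_getElem_cons hc, List.getD_cons_zero,
              List.getD_eq_getElem _ _ hc]
          rw [hval]
          simp only [hne]
          split_ifs with h2
          · exact ⟨by simp, rfl, hle⟩
          · exact ⟨by simp, rfl, hle⟩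
        · have hni : pos2.drop (leafSkip pos2 (pos1.getD lo 0) j) = [] := by
            rw [List.drop_eq_nil_iff]
            omega
          rw [if_neg (fun hcc => hc hcc.1), if_neg (fun hcc => hcc.1 hni)]
          exact ⟨by simp, by rw [hni], hle⟩
      · rw [coordDC, if_neg h0, if_neg h1]
        have hsplit : (hi - lo) = ((lo + hi) / 2 - lo) + (hi - (lo + hi) / 2) := by omega
        rw [hsplit, List.take_add, List.drop_drop]
        have hmid : lo + ((lo + hi) / 2 - lo) = (lo + hi) / 2 := by omega
        rw [hmid, goSeq_append]
        obtain ⟨e1, e2, e3⟩ := ih lo ((lo + hi) / 2) (by omega) (by omega) j hj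
        obtain ⟨f1, f2, f3⟩ := ih ((lo + hi) / 2) hi (by omega) hhi
          (coordDC pos1 pos2 dist lo ((lo + hi) / 2) j).2 e3
        rw [← e1, ← e2, ← f1, ← f2]
        exact ⟨by simp, by simp, f3⟩

-- ===== VERDICT (by name: the statement is the Claim_ definition above) =====
theorem coord_intersect_spec : Claim_equal_coord_intersect := by
  intro pos1 pos2 dist _
  unfold Spec_coord_intersect coord_intersect coord_intersect_alt
  have hA := coordILoop_eq_go pos1 pos2 dist 0 0 []
  simp only [List.drop_zero, List.nil_append] at hA
  rw [hA]
  have hB := (coordDC_inv pos1 pos2 dist pos1.length 0 pos1.length (by omega) (le_refl _)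
    0 (Nat.zero_le _)).1
  simp only [List.drop_zero, Nat.sub_zero, List.take_length] at hB
  rw [hB]
  exact coordGo_eq_goSeq dist (pos1.length + pos2.length) pos1 pos2 (le_refl _)
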